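-- pv_equiv track=rewrite | github.com/areese801/markdown_todoist | helpers.py | _transform_windows_style_path_to_wsl_equivalent
-- ===== SOURCE A (Python) =====
-- def _transform_windows_style_path_to_wsl_equivalent(some_path:str) -> str:
--     """
--     Transformas a path like: 'C:\\Users\\Adam Reese\\Obsidian\\Work Vault'
--     into something like this:  '/mnt/c/Users/Adam Reese/Obsidian/Work Vault'
--     :param some_path: A windows-like file path
--     :return:
--     """
--
--     path_split = some_path.split('\\')
--
--     parts=[]
--     for i in range(len(path_split)):
--         if i == 0:
--             parts.append(path_split[i][0].lower())
--         else:
--             parts.append(path_split[i])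
--
--     linux_mount_point = '/mnt/' + '/'.join(parts)
--
--     ret_val = linux_mount_point
--     return ret_val
-- ===== SOURCE B (Python) =====
-- def _transform_windows_style_path_to_wsl_equivalent(some_path: str) -> str:
--     # One left-to-right scan instead of split / index loop / join:
--     # keep only the first character of the drive element (lowered), turn each
--     # backslash into '/', and copy characters only once past the first backslash.
--     out = ['/mnt/', some_path[0].lower()]
--     seen_sep = False
--     for ch in some_path[1:]:
--         if ch == '\\':
--             out.append('/')
--             seen_sep = True
--         elif seen_sep:
--             out.append(ch)
--     return ''.join(out)
-- ===== Notes on version B (the rewrite author's own statement) =====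
-- stated objective: simpler
-- what changed: Replaced A's split-on-backslash, index loop over the parts and join by a single left-to-right character scan that lowers the first character, maps each backslash to a forward slash and copies characters only once past the first backslash.
-- outside the precondition, e.g. on _transform_windows_style_path_to_wsl_equivalent('\\'): A raises IndexError, B returns '/mnt/\\'
import Mathlib
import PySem

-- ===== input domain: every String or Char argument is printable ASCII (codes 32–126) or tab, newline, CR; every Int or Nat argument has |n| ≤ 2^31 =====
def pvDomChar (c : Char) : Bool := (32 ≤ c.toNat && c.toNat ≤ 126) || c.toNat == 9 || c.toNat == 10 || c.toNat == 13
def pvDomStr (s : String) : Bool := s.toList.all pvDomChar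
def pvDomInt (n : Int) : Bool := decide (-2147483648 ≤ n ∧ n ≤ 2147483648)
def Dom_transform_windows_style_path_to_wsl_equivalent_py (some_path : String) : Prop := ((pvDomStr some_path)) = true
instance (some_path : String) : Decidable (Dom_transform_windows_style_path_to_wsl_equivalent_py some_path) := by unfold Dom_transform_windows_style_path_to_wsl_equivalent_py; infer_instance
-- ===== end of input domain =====

-- B replaces A's split / index loop / join by a single left-to-right character scan (simpler, one pass, no intermediate list of parts).

-- ===== PORT A =====
-- path_split = some_path.split('\\'); loop over range(len(path_split)); '/mnt/' + '/'.join(parts)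
def transform_windows_style_path_to_wsl_equivalent_py (some_path : String) : String :=
  let path_split := PySem.Chars.splitOn some_path.toList ['\\']
  let parts := (PySem.List.pyRange 0 (PySem.List.len path_split) 1).foldl
    (fun (parts : List (List Char)) i =>
      if i == 0 then
        -- path_split[i][0].lower(); the index 0 can raise IndexError (empty head), excluded by Pre_
        match PySem.List.pyGet? (PySem.List.pyGetD path_split i []) 0 with
        | some c => parts ++ [[PySem.Chars.lowerChar c]]
        | none => parts ++ [[]]   -- IndexError in Python; unreachable under Pre_
      else parts ++ [PySem.List.pyGetD path_split i []]) []
  String.mk ("/mnt/".toList ++ PySem.Chars.join ['/'] parts)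

-- ===== PORT B =====
-- out = ['/mnt/', some_path[0].lower()]; one scan over some_path[1:] with a seen-separator flag; ''.join(out)
def transform_windows_style_path_to_wsl_equivalent_py_alt (some_path : String) : String :=
  let cs := some_path.toList
  match PySem.List.pyGet? cs 0 with
  | none => ""   -- IndexError in Python; unreachable under Pre_
  | some c0 =>
    let st := (PySem.List.slice cs (some 1) none).foldl
      (fun (st : List Char × Bool) ch =>
        if ch = '\\' then (st.1 ++ ['/'], true)
        else if st.2 then (st.1 ++ [ch], st.2)
        else st)
      ("/mnt/".toList ++ [PySem.Chars.lowerChar c0], false)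
    String.mk st.1

-- ===== PRECONDITION & SPEC =====
-- Pre_ excludes exactly the inputs where A raises IndexError: the empty string and
-- strings starting with '\', whose first '\\'-split element is empty so path_split[0][0] raises.
def Pre_transform_windows_style_path_to_wsl_equivalent_py (some_path : String) : Prop :=
  some_path.toList ≠ [] ∧ some_path.toList.head? ≠ some '\\'
instance (some_path : String) : Decidable (Pre_transform_windows_style_path_to_wsl_equivalent_py some_path) := by unfold Pre_transform_windows_style_path_to_wsl_equivalent_py; infer_instance

def pvWitness_transform_windows_style_path_to_wsl_equivalent_py : String := "C:\\Users\\x"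

def Spec_transform_windows_style_path_to_wsl_equivalent_py (some_path : String) (out : String) : Prop := out = transform_windows_style_path_to_wsl_equivalent_py_alt some_path
instance (some_path : String) (out : String) : Decidable (Spec_transform_windows_style_path_to_wsl_equivalent_py some_path out) := by unfold Spec_transform_windows_style_path_to_wsl_equivalent_py; infer_instance

-- ===== CLAIM (what is proved, stated in full; the proofs are below) =====
def Claim_equal_transform_windows_style_path_to_wsl_equivalent_py : Prop := ∀ (some_path : String), Dom_transform_windows_style_path_to_wsl_equivalent_py some_path → Pre_transform_windows_style_path_to_wsl_equivalent_py some_path → Spec_transform_windows_style_path_to_wsl_equivalent_py some_path (transform_windows_style_path_to_wsl_equivalent_py some_path)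

-- ===== LEMMAS AND PROOFS =====

-- recursive characterisation of Python's split on the single character '\'
def pvSpl : List Char → List (List Char)
  | [] => [[]]
  | c :: rest => if c = '\\' then [] :: pvSpl rest
                 else match pvSpl rest with
                      | [] => [[c]]          -- unreachable: pvSpl never returns []
                      | p :: ps => (c :: p) :: ps

-- prepend a prefix onto the first part
def pvConsHead (pre : List Char) : List (List Char) → List (List Char)
  | [] => [pre]
  | p :: ps => (pre ++ p) :: ps

theorem pvSpl_ne_nil (l : List Char) : pvSpl l ≠ [] := by
  cases l with
  | nil => simp [pvSpl]
  | cons c rest =>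
    simp only [pvSpl]
    split
    · simp
    · cases h : pvSpl rest <;> simp

theorem pvConsHead_consHead (a b : List Char) (ps : List (List Char)) :
    pvConsHead a (pvConsHead b ps) = pvConsHead (a ++ b) ps := by
  cases ps <;> simp [pvConsHead]

theorem pvSpl_cons_ne (c : Char) (rest : List Char) (h : c ≠ '\\') :
    pvSpl (c :: rest) = pvConsHead [c] (pvSpl rest) := by
  simp only [pvSpl, if_neg h]
  cases hs : pvSpl rest with
  | nil => exact absurd hs (pvSpl_ne_nil rest)
  | cons p ps => simp [pvConsHead]

theorem pvGo_eq (fuel : Nat) (l cur : List Char) (acc : List (List Char))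
    (hf : l.length ≤ fuel) :
    PySem.Chars.splitOn.go ['\\'] fuel l cur acc
      = acc.reverse ++ pvConsHead cur.reverse (pvSpl l) := by
  induction fuel generalizing l cur acc with
  | zero =>
    have : l = [] := List.length_eq_zero_iff.mp (Nat.le_zero.mp hf)
    subst this
    simp [PySem.Chars.splitOn.go, pvSpl, pvConsHead]
  | succ fuel ih =>
    cases l with
    | nil => simp [PySem.Chars.splitOn.go, pvSpl, pvConsHead]
    | cons c rest =>
      by_cases hc : c = '\\'
      · subst hc
        have hpre : List.isPrefixOf ['\\'] ('\\' :: rest) = true := by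
          simp [List.isPrefixOf]
        rw [show PySem.Chars.splitOn.go ['\\'] (fuel+1) ('\\' :: rest) cur acc
              = PySem.Chars.splitOn.go ['\\'] fuel (List.drop (List.length ['\\']) ('\\' :: rest)) [] (cur.reverse :: acc) from by
          conv_lhs => rw [PySem.Chars.splitOn.go]
          simp [hpre]]
        rw [ih _ _ _ (by simpa using Nat.le_of_succ_le_succ hf)]
        have hne := pvSpl_ne_nil rest
        cases hs : pvSpl rest with
        | nil => exact absurd hs hne
        | cons p ps =>
          simp [pvSpl, pvConsHead, hs]
      · have hpre : List.isPrefixOf ['\\'] (c :: rest) = false := by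
          simp [List.isPrefixOf]
          exact fun h => hc h.symm
        rw [show PySem.Chars.splitOn.go ['\\'] (fuel+1) (c :: rest) cur acc
              = PySem.Chars.splitOn.go ['\\'] fuel rest (c :: cur) acc from by
          conv_lhs => rw [PySem.Chars.splitOn.go]
          simp [hpre]]
        rw [ih _ _ _ (Nat.le_of_succ_le_succ hf)]
        rw [pvSpl_cons_ne c rest hc, pvConsHead_consHead]
        simp

theorem pvSplitOn_eq (cs : List Char) : PySem.Chars.splitOn cs ['\\'] = pvSpl cs := by
  rw [PySem.Chars.splitOn, pvGo_eq _ _ _ _ (Nat.le_succ _)]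
  cases h : pvSpl cs with
  | nil => exact absurd h (pvSpl_ne_nil cs)
  | cons p ps => simp [pvConsHead]

-- the scan underlying B, with the seen-separator flag
def pvScan : Bool → List Char → List Char
  | _, [] => []
  | seen, c :: rest =>
    if c = '\\' then '/' :: pvScan true rest
    else if seen then c :: pvScan true rest
    else pvScan false rest

theorem pvScan_true_eq_map (r : List Char) :
    pvScan true r = r.map (fun c => if c = '\\' then '/' else c) := by
  induction r with
  | nil => simp [pvScan]
  | cons c rest ih =>
    by_cases hc : c = '\\' <;> simp [pvScan, hc, ih]

theorem pvJoin_spl_eq_map (r : List Char) :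
    PySem.Chars.join ['/'] (pvSpl r) = r.map (fun c => if c = '\\' then '/' else c) := by
  induction r with
  | nil => simp [pvSpl, PySem.Chars.join, List.intercalate]
  | cons c rest ih =>
    by_cases hc : c = '\\'
    · subst hc
      have hne := pvSpl_ne_nil rest
      cases hs : pvSpl rest with
      | nil => exact absurd hs hne
      | cons p ps =>
        simp only [pvSpl, if_pos rfl, hs] at *
        simpa [PySem.Chars.join, List.intercalate, List.intersperse] using ih
    · rw [pvSpl_cons_ne c rest hc]
      have hne := pvSpl_ne_nil rest
      cases hs : pvSpl rest with
      | nil => exact absurd hs hne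
      | cons p ps =>
        simp only [pvConsHead]
        simp only [PySem.Chars.join, List.intercalate] at ih ⊢
        cases ps <;> simp_all [List.intersperse, hc]

theorem pvJoin_keepFirst (x : Char) (r : List Char) :
    PySem.Chars.join ['/'] ([x] :: (pvSpl r).tail) = x :: pvScan false r := by
  induction r with
  | nil => simp [pvSpl, pvScan, PySem.Chars.join, List.intercalate]
  | cons c rest ih =>
    by_cases hc : c = '\\'
    · subst hc
      simp only [pvSpl, if_pos rfl, List.tail_cons, pvScan]
      have hne := pvSpl_ne_nil rest
      cases hs : pvSpl rest with
      | nil => exact absurd hs hne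
      | cons p ps =>
        have hjoin := pvJoin_spl_eq_map rest
        rw [hs] at hjoin
        rw [pvScan_true_eq_map, ← hjoin]
        simp [PySem.Chars.join, List.intercalate, List.intersperse]
    · rw [pvSpl_cons_ne c rest hc]
      have hne := pvSpl_ne_nil rest
      cases hs : pvSpl rest with
      | nil => exact absurd hs hne
      | cons p ps =>
        rw [hs] at ih
        simp only [List.tail_cons] at ih
        simp [pvConsHead, pvScan, hc, ih]

-- B's foldl accumulates exactly pvScan
theorem pvFoldB (r out : List Char) (seen : Bool) :
    (r.foldl
      (fun (st : List Char × Bool) ch =>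
        if ch = '\\' then (st.1 ++ ['/'], true)
        else if st.2 then (st.1 ++ [ch], st.2)
        else st) (out, seen)).1 = out ++ pvScan seen r := by
  induction r generalizing out seen with
  | nil => simp [pvScan]
  | cons c rest ih =>
    by_cases hc : c = '\\'
    · subst hc; simp [pvScan, ih]
    · cases seen <;> simp [pvScan, hc, ih]

-- A's index loop produces [[lower c]] ++ tail parts when the head part starts with c
theorem pvLoopA (c : Char) (h : List Char) (t : List (List Char)) :
    (PySem.List.pyRange 0 (PySem.List.len ((c :: h) :: t)) 1).foldl
      (fun (parts : List (List Char)) i =>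
        if i == 0 then
          match PySem.List.pyGet? (PySem.List.pyGetD ((c :: h) :: t) i []) 0 with
          | some c' => parts ++ [[PySem.Chars.lowerChar c']]
          | none => parts ++ [[]]
        else parts ++ [PySem.List.pyGetD ((c :: h) :: t) i []]) []
    = [[PySem.Chars.lowerChar c]] ++ t := by
  have h01 : (0 : Int) < PySem.List.len ((c :: h) :: t) := by
    simp [PySem.List.len]
  rw [PySem.List.pyRange_one_cons h01]
  simp only [List.foldl_cons, beq_self_eq_true, if_pos]
  have hget : PySem.List.pyGetD ((c :: h) :: t) 0 [] = c :: h := by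
    simp [PySem.List.pyGetD, PySem.List.pyGet?, PySem.List.pyIdx?]
  rw [hget]
  have hget0 : PySem.List.pyGet? (c :: h) 0 = some c := by
    simp [PySem.List.pyGet?, PySem.List.pyIdx?]
  rw [hget0]
  have hred : (match (some c : Option Char) with
      | some c' => ([] : List (List Char)) ++ [[PySem.Chars.lowerChar c']]
      | none => ([] : List (List Char)) ++ [[]]) = [[PySem.Chars.lowerChar c]] := rfl
  rw [hred]
  have hcongr :
      (PySem.List.pyRange (0+1) (PySem.List.len ((c :: h) :: t)) 1).foldl
        (fun (parts : List (List Char)) i =>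
          if i == 0 then
            match PySem.List.pyGet? (PySem.List.pyGetD ((c :: h) :: t) i []) 0 with
            | some c' => parts ++ [[PySem.Chars.lowerChar c']]
            | none => parts ++ [[]]
          else parts ++ [PySem.List.pyGetD ((c :: h) :: t) i []]) [[PySem.Chars.lowerChar c]]
      = (PySem.List.pyRange 1 (PySem.List.len ((c :: h) :: t)) 1).foldl
          (fun (parts : List (List Char)) i => parts ++ [PySem.List.pyGetD ((c :: h) :: t) i []])
          [[PySem.Chars.lowerChar c]] := by
    apply PySem.List.foldl_congr_mem
    intro acc i hi
    have h1 : (1 : Int) ≤ i := (PySem.List.mem_pyRange_one.mp hi).1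
    have : (i == 0) = false := by
      simp only [beq_eq_false_iff_ne]; omega
    rw [this]
    simp
  rw [hcongr]
  rw [PySem.List.foldl_pyRange_pyGetD ((c :: h) :: t) [] (fun acc x => acc ++ [x])
        [[PySem.Chars.lowerChar c]] (by norm_num : (0:Int) ≤ 1)]
  rw [PySem.List.foldl_append_singleton_eq_map]
  simp

-- ===== VERDICT (by name: the statement is the Claim_ definition above) =====
theorem transform_windows_style_path_to_wsl_equivalent_py_spec : Claim_equal_transform_windows_style_path_to_wsl_equivalent_py := by
  intro some_path _ hpre
  obtain ⟨hne, hhd⟩ := hpre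
  unfold Spec_transform_windows_style_path_to_wsl_equivalent_py
  unfold transform_windows_style_path_to_wsl_equivalent_py
  unfold transform_windows_style_path_to_wsl_equivalent_py_alt
  cases hcs : some_path.toList with
  | nil => exact absurd hcs hne
  | cons c rest =>
    have hc : c ≠ '\\' := by
      rw [hcs] at hhd; simpa using hhd
    have hget0 : PySem.List.pyGet? (c :: rest) 0 = some c := by
      simp [PySem.List.pyGet?, PySem.List.pyIdx?]
    simp only [hget0]
    have hslice : PySem.List.slice (c :: rest) (some 1) none = rest := by
      simpa using PySem.List.slice_from (c :: rest) (a := 1) (by norm_num)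
    rw [hslice, pvFoldB]
    -- reduce A's side
    rw [pvSplitOn_eq, pvSpl_cons_ne c rest hc]
    have hne' := pvSpl_ne_nil rest
    cases hs : pvSpl rest with
    | nil => exact absurd hs hne'
    | cons p ps =>
      simp only [pvConsHead, List.singleton_append]
      rw [pvLoopA c p ps]
      have : PySem.Chars.join ['/'] ([[PySem.Chars.lowerChar c]] ++ ps)
          = PySem.Chars.lowerChar c :: pvScan false rest := by
        have := pvJoin_keepFirst (PySem.Chars.lowerChar c) rest
        rw [hs] at this
        simpa using this
      simp only [List.singleton_append] at this ⊢
      rw [this]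
      simp
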